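-- pv_equiv track=rewrite | github.com/yukinorin775780/Algorithm_training | 回溯算法/93.复原 IP 地址.py | isVaild
-- ===== SOURCE A (Python) =====
-- def isVaild(s, start, end):
--     if start > end:
--         return False
--     if s[start] == '0' and start != end:    # 0开头不合法
--         return False
--     num = 0
--     for i in range(start, end + 1):
--         if not s[i].isdigit():  # 非数字不合法
--             return False
--         num = num * 10 + int(s[i])
--         if num > 255: # 数字大于255不合法
--             return False
--     return True
-- ===== SOURCE B (Python) =====
-- def isVaild(s, start, end):
--     if start > end:
--         return False
--     seg = ''.join(s[i] for i in range(start, end + 1))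
--     if not seg.isdigit():
--         return False
--     if seg[0] == '0':
--         return len(seg) == 1
--     if len(seg) != 3:
--         return len(seg) < 3
--     return seg <= '255'
-- ===== Notes on version B (the rewrite author's own statement) =====
-- stated objective: simpler
-- what changed: A scans the range with a running decimal accumulator and three inline early exits; B builds the segment string once, then judges it by shape alone: digits-only check, leading-zero rule, and a length test plus a lexicographic comparison with '255' instead of any numeric accumulation.
-- outside the precondition, e.g. on isVaild('a5', 0, 5): A returns False, B raises IndexError
import Mathlib
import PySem

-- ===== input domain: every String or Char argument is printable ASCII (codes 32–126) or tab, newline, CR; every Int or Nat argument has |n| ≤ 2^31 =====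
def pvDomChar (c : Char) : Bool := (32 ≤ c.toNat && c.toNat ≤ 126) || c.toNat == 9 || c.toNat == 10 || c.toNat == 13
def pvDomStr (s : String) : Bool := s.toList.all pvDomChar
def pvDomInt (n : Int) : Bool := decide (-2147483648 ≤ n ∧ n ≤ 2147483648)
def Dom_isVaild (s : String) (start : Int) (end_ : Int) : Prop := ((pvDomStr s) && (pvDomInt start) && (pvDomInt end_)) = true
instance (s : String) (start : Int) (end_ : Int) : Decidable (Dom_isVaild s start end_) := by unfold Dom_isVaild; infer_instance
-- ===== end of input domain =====

-- B replaces A's running decimal accumulator and inline >255 early-exit by a single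
-- validate-then-judge pass over the extracted segment: digits-only, leading-zero rule,
-- and a length test plus a lexicographic comparison with "255" (objective: simpler).


-- ===== PORT A =====
-- the 'for i in range(start, end+1)' loop with its accumulator 'num' and early returns
def isVaildLoop (s : String) (num : Int) : List Int → Bool
  | [] => true
  | i :: rest =>
    match PySem.Str.pyGet? s i with
    | none => false          -- IndexError on s[i]; outside Pre_
    | some c =>
      if ¬ PySem.Chars.isdigit c then false
      else
        match PySem.Int.ofChars? [c] with
        | none => false      -- int(s[i]) ValueError; unreachable after isdigit on ASCII
        | some d =>
          if num * 10 + d > 255 then false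
          else isVaildLoop s (num * 10 + d) rest

def isVaild (s : String) (start : Int) (end_ : Int) : Bool :=
  if start > end_ then false
  else
    match PySem.Str.pyGet? s start with
    | none => false          -- IndexError on s[start]; outside Pre_
    | some c =>
      if c == '0' && start != end_ then false
      else isVaildLoop s 0 (PySem.List.pyRange start (end_ + 1) 1)

-- ===== PORT B =====
-- Python's str <= str is code-point lexicographic; ported by hand, exact on all strings
def lexLe : List Char → List Char → Bool
  | [], _ => true
  | _ :: _, [] => false
  | a :: as, b :: bs =>
    if a.toNat < b.toNat then true
    else if b.toNat < a.toNat then false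
    else lexLe as bs

def isVaild_alt (s : String) (start : Int) (end_ : Int) : Bool :=
  if start > end_ then false
  else
    let seg? := (PySem.List.pyRange start (end_ + 1) 1).map (fun i => PySem.Str.pyGet? s i)
    if seg?.any Option.isNone then false   -- IndexError while building the segment; outside Pre_
    else
      let seg := seg?.reduceOption
      if ¬ PySem.Chars.strIsdigit seg then false
      else
        match seg with
        | [] => false                      -- unreachable: ''.isdigit() is False
        | c0 :: _ =>
          if c0 == '0' then (seg.length == 1 : Bool)
          else if (seg.length != 3 : Bool) then decide (seg.length < 3)
          else lexLe seg ['2', '5', '5']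

-- ===== PRECONDITION & SPEC =====
-- Pre_ excludes exactly the index ranges that reach outside s (past its end, or below
-- -len(s)): there A raises IndexError unless an early non-digit / leading-zero / >255
-- exit fires first, while B, which extracts the whole segment before validating,
-- always raises IndexError.
def Pre_isVaild (s : String) (start : Int) (end_ : Int) : Prop :=
  end_ < start ∨ (-(s.toList.length : Int) ≤ start ∧ end_ < (s.toList.length : Int))
instance (s : String) (start : Int) (end_ : Int) : Decidable (Pre_isVaild s start end_) := by
  unfold Pre_isVaild; infer_instance

def pvWitness_isVaild : String × Int × Int := ("255", 0, 2)

def Spec_isVaild (s : String) (start : Int) (end_ : Int) (out : Bool) : Prop := out = isVaild_alt s start end_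
instance (s : String) (start : Int) (end_ : Int) (out : Bool) : Decidable (Spec_isVaild s start end_ out) := by unfold Spec_isVaild; infer_instance

-- ===== CLAIM (what is proved, stated in full; the proofs are below) =====
def Claim_equal_isVaild : Prop := ∀ (s : String) (start : Int) (end_ : Int), Dom_isVaild s start end_ → Pre_isVaild s start end_ → Spec_isVaild s start end_ (isVaild s start end_)

-- ===== LEMMAS AND PROOFS =====

-- digit value of an ASCII digit char
def dv (c : Char) : Int := (c.toNat : Int) - 48
-- A's accumulator loop, rephrased on the extracted characters
def loopC (num : Int) : List Char → Bool
  | [] => true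
  | c :: rest =>
    if PySem.Chars.isdigit c then
      (if num * 10 + dv c > 255 then false else loopC (num * 10 + dv c) rest)
    else false
-- the decimal value A's accumulator reaches
def segVal (num : Int) (cs : List Char) : Int := cs.foldl (fun n c => n * 10 + dv c) num

theorem eq_char_of_toNat (c d : Char) (h : c.toNat = d.toNat) : c = d :=
  Char.ext (UInt32.toNat_inj.mp h)

theorem digit_bounds (c : Char) (h : PySem.Chars.isdigit c = true) : 48 ≤ c.toNat ∧ c.toNat ≤ 57 := by
  simp [PySem.Chars.isdigit, Char.le_def] at h
  exact ⟨h.1, h.2⟩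

theorem ofChars_digit (c : Char) (h : PySem.Chars.isdigit c = true) :
    PySem.Int.ofChars? [c] = some (dv c) := by
  obtain ⟨h1, h2⟩ := digit_bounds c h
  have hn : c.toNat = 48 ∨ c.toNat = 49 ∨ c.toNat = 50 ∨ c.toNat = 51 ∨ c.toNat = 52 ∨
      c.toNat = 53 ∨ c.toNat = 54 ∨ c.toNat = 55 ∨ c.toNat = 56 ∨ c.toNat = 57 := by omega
  rcases hn with h'|h'|h'|h'|h'|h'|h'|h'|h'|h'
  · rw [eq_char_of_toNat c '0' (h'.trans (by decide))]; decide
  · rw [eq_char_of_toNat c '1' (h'.trans (by decide))]; decide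
  · rw [eq_char_of_toNat c '2' (h'.trans (by decide))]; decide
  · rw [eq_char_of_toNat c '3' (h'.trans (by decide))]; decide
  · rw [eq_char_of_toNat c '4' (h'.trans (by decide))]; decide
  · rw [eq_char_of_toNat c '5' (h'.trans (by decide))]; decide
  · rw [eq_char_of_toNat c '6' (h'.trans (by decide))]; decide
  · rw [eq_char_of_toNat c '7' (h'.trans (by decide))]; decide
  · rw [eq_char_of_toNat c '8' (h'.trans (by decide))]; decide
  · rw [eq_char_of_toNat c '9' (h'.trans (by decide))]; decide

theorem loop_bridge (s : String) (num : Int) (L : List Int) (cs : List Char)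
    (h : L.map (PySem.Str.pyGet? s) = cs.map some) :
    isVaildLoop s num L = loopC num cs := by
  induction L generalizing num cs with
  | nil =>
    cases cs with
    | nil => rfl
    | cons c t => simp at h
  | cons i rest ih =>
    cases cs with
    | nil => simp at h
    | cons c t =>
      simp only [List.map_cons, List.cons.injEq] at h
      obtain ⟨hg, ht⟩ := h
      simp only [isVaildLoop, hg, loopC]
      by_cases hc : PySem.Chars.isdigit c = true
      · simp only [hc, not_true, if_false, if_true, ofChars_digit c hc]
        split
        · rfl
        · exact ih _ _ ht
      · simp [hc]

theorem loopC_nondigit (num : Int) (cs : List Char) (h : ¬ cs.all PySem.Chars.isdigit) :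
    loopC num cs = false := by
  induction cs generalizing num with
  | nil => simp at h
  | cons c rest ih =>
    simp only [List.all_cons, Bool.and_eq_true, not_and] at h
    by_cases hc : PySem.Chars.isdigit c = true
    · simp only [loopC, hc, if_true]
      split
      · rfl
      · exact ih _ (by simpa [hc] using h hc)
    · simp [loopC, hc]

theorem segVal_mono (num : Int) (cs : List Char) (h0 : 0 ≤ num) (h : cs.all PySem.Chars.isdigit) :
    num ≤ segVal num cs := by
  induction cs generalizing num with
  | nil => simp [segVal]
  | cons c rest ih =>
    simp only [List.all_cons, Bool.and_eq_true] at h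
    have hb := digit_bounds c h.1
    have hd : 0 ≤ dv c := by simp only [dv]; omega
    have h1 : num ≤ num * 10 + dv c := by nlinarith
    have h2 : (0:Int) ≤ num * 10 + dv c := by nlinarith
    calc num ≤ num * 10 + dv c := h1
      _ ≤ segVal (num * 10 + dv c) rest := ih _ h2 h.2
      _ = segVal num (c :: rest) := rfl

theorem segVal_growth (num : Int) (cs : List Char) (h0 : 0 ≤ num) (h : cs.all PySem.Chars.isdigit) :
    num * 10 ^ cs.length ≤ segVal num cs := by
  induction cs generalizing num with
  | nil => simp [segVal]
  | cons c rest ih =>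
    simp only [List.all_cons, Bool.and_eq_true] at h
    have hb := digit_bounds c h.1
    have hd : 0 ≤ dv c := by simp only [dv]; omega
    have h2 : (0:Int) ≤ num * 10 + dv c := by nlinarith
    have key := ih (num * 10 + dv c) h2 h.2
    have hpow : (0:Int) ≤ 10 ^ rest.length := by positivity
    have hstep : num * 10 ^ (c :: rest).length ≤ (num * 10 + dv c) * 10 ^ rest.length := by
      simp only [List.length_cons, pow_succ]
      nlinarith
    calc num * 10 ^ (c :: rest).length ≤ (num * 10 + dv c) * 10 ^ rest.length := hstep
      _ ≤ segVal (num * 10 + dv c) rest := key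
      _ = segVal num (c :: rest) := rfl

theorem loopC_val (cs : List Char) (num : Int) (h0 : 0 ≤ num) (h255 : num ≤ 255)
    (h : cs.all PySem.Chars.isdigit) :
    loopC num cs = decide (segVal num cs ≤ 255) := by
  induction cs generalizing num with
  | nil => simp [loopC, segVal, h255]
  | cons c rest ih =>
    simp only [List.all_cons, Bool.and_eq_true] at h
    have hb := digit_bounds c h.1
    have hd : 0 ≤ dv c := by simp only [dv]; omega
    have h2 : (0:Int) ≤ num * 10 + dv c := by nlinarith
    simp only [loopC, h.1, if_true]
    by_cases hgt : num * 10 + dv c > 255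
    · have hmono := segVal_mono (num * 10 + dv c) rest h2 h.2
      have hno : ¬ segVal num (c :: rest) ≤ 255 := by
        show ¬ segVal (num * 10 + dv c) rest ≤ 255
        omega
      simp [hgt, hno]
    · rw [if_neg hgt]
      have hle : num * 10 + dv c ≤ 255 := by omega
      exact ih (num * 10 + dv c) h2 hle h.2

theorem reduceOption_map_some {α : Type} (l : List α) : (l.map some).reduceOption = l := by
  induction l with
  | nil => rfl
  | cons a t ih => simp [List.reduceOption_cons_of_some, ih]

-- the heart: A's guarded accumulator loop equals B's shape test, on any extracted segment
theorem pure_equiv (c0 : Char) (rest : List Char) :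
    (if c0 = '0' ∧ rest ≠ [] then false else loopC 0 (c0 :: rest)) =
    (if ¬ PySem.Chars.strIsdigit (c0 :: rest) then false
     else if c0 == '0' then ((c0 :: rest).length == 1 : Bool)
     else if ((c0 :: rest).length != 3 : Bool) then decide ((c0 :: rest).length < 3)
     else lexLe (c0 :: rest) ['2', '5', '5']) := by
  by_cases hall : (c0 :: rest).all PySem.Chars.isdigit = true
  · have hs : PySem.Chars.strIsdigit (c0 :: rest) = true := by
      simp [PySem.Chars.strIsdigit, hall]
    rw [if_neg (not_not_intro hs)]
    by_cases h0 : c0 = '0'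
    · subst h0
      cases rest with
      | nil => decide
      | cons b t =>
        rw [if_pos (⟨rfl, (by simp : b :: t ≠ [])⟩ : ('0':Char) = '0' ∧ b :: t ≠ [])]
        simp
    · rw [if_neg (show ¬ (c0 = '0' ∧ rest ≠ []) from fun hq => h0 hq.1)]
      have hd0 : PySem.Chars.isdigit c0 = true := by
        simp only [List.all_cons, Bool.and_eq_true] at hall; exact hall.1
      have hble : ((c0 == '0') : Bool) = false := by simp [h0]
      rw [loopC_val _ 0 le_rfl (by norm_num) hall]
      simp only [hble, Bool.false_eq_true, if_false]
      have hn0 : c0.toNat ≠ 48 := fun hh => h0 (eq_char_of_toNat c0 '0' (hh.trans (by decide)))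
      obtain ⟨hb1, hb2⟩ := digit_bounds c0 hd0
      rcases rest with _ | ⟨b, _ | ⟨c, _ | ⟨d, t⟩⟩⟩
      · simp only [segVal, List.foldl, List.length_cons, List.length_nil]
        norm_num [dv]
        omega
      · simp only [List.all_cons, Bool.and_eq_true] at hall
        obtain ⟨hbb1, hbb2⟩ := digit_bounds b hall.2.1
        simp only [segVal, List.foldl, List.length_cons, List.length_nil]
        norm_num [dv]
        omega
      · simp only [List.all_cons, Bool.and_eq_true] at hall
        obtain ⟨hbb1, hbb2⟩ := digit_bounds b hall.2.1
        obtain ⟨hcc1, hcc2⟩ := digit_bounds c hall.2.2.1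
        simp only [segVal, List.foldl, List.length_cons, List.length_nil]
        norm_num
        have h2' : ('2':Char).toNat = 50 := by decide
        have h5' : ('5':Char).toNat = 53 := by decide
        simp only [lexLe, h2', h5']
        split_ifs <;> simp [dv] <;> omega
      · have hlen4 : (c0 :: b :: c :: d :: t).length = t.length + 4 := by simp
        have hge : (1:Int) ≤ dv c0 := by simp only [dv]; omega
        have hgrow := segVal_growth (0 * 10 + dv c0) (b :: c :: d :: t) (by simp only [dv]; omega)
          (by simp only [List.all_cons, Bool.and_eq_true] at hall ⊢; exact hall.2)
        have hsv : segVal 0 (c0 :: b :: c :: d :: t) = segVal (0 * 10 + dv c0) (b :: c :: d :: t) := rfl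
        have hlen3 : (b :: c :: d :: t).length = t.length + 3 := by simp
        have hpow : (10:Int) ^ 3 ≤ 10 ^ (t.length + 3) := by
          apply pow_le_pow_right₀ (by norm_num)
          omega
        have hbig : ¬ segVal 0 (c0 :: b :: c :: d :: t) ≤ 255 := by
          rw [hsv]
          rw [hlen3] at hgrow
          nlinarith
        simp only [hlen4]
        rw [if_pos (show (t.length + 4 != 3) = true by simp)]
        simp [hbig, show ¬ (t.length + 4 < 3) by omega]
  · have hB : PySem.Chars.strIsdigit (c0 :: rest) = false := by
      simp only [PySem.Chars.strIsdigit]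
      simp [hall]
    simp only [hB, Bool.false_eq_true, not_false_iff, if_true]
    split_ifs with hg
    · rfl
    · exact loopC_nondigit 0 _ (by simpa using hall)

-- ===== VERDICT (by name: the statement is the Claim_ definition above) =====
theorem isVaild_spec : Claim_equal_isVaild := by
  intro s start end_ _hdom hpre
  unfold Spec_isVaild
  by_cases hgt : start > end_
  · simp [isVaild, isVaild_alt, hgt]
  · have hle : start ≤ end_ := le_of_not_gt hgt
    obtain ⟨h1, h2⟩ : -(s.toList.length : Int) ≤ start ∧ end_ < (s.toList.length : Int) := by
      rcases hpre with h | h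
      · omega
      · exact h
    have hsome : ∀ i ∈ PySem.List.pyRange start (end_ + 1) 1, (PySem.Str.pyGet? s i).isSome := by
      intro i hi
      rw [PySem.List.mem_pyRange_one] at hi
      cases hg : PySem.Str.pyGet? s i with
      | some c => rfl
      | none =>
        exfalso
        have := (PySem.List.pyGet?_eq_none_iff s.toList i).mp hg
        exact this ⟨by omega, by omega⟩
    have hmap : (PySem.List.pyRange start (end_ + 1) 1).map (fun i => PySem.Str.pyGet? s i) =
        ((PySem.List.pyRange start (end_ + 1) 1).map
          (fun i => (PySem.Str.pyGet? s i).getD ' ')).map some := by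
      rw [List.map_map]
      apply List.map_congr_left
      intro i hi
      obtain ⟨c, hc⟩ := Option.isSome_iff_exists.mp (hsome i hi)
      have hc' : PySem.List.pyGet? s.toList i = some c := hc
      simp [Function.comp, hc']
    have hstart_mem : start ∈ PySem.List.pyRange start (end_ + 1) 1 := by
      rw [PySem.List.mem_pyRange_one]; omega
    obtain ⟨ch, hch⟩ := Option.isSome_iff_exists.mp (hsome start hstart_mem)
    have hR : PySem.List.pyRange start (end_ + 1) 1 =
        start :: PySem.List.pyRange (start + 1) (end_ + 1) 1 :=
      PySem.List.pyRange_one_cons (by omega)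
    have hcs : (PySem.List.pyRange start (end_ + 1) 1).map
        (fun i => (PySem.Str.pyGet? s i).getD ' ') =
        ch :: (PySem.List.pyRange (start + 1) (end_ + 1) 1).map
          (fun i => (PySem.Str.pyGet? s i).getD ' ') := by
      rw [hR]
      have hch' : PySem.List.pyGet? s.toList start = some ch := hch
      simp [hch']
    have hguard : ((ch == '0') && (start != end_)) =
        decide (ch = '0' ∧ (PySem.List.pyRange (start + 1) (end_ + 1) 1).map
          (fun i => (PySem.Str.pyGet? s i).getD ' ') ≠ []) := by
      by_cases hse : start = end_
      · subst hse
        rw [PySem.List.pyRange_one_eq_nil (by omega)]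
        simp
      · have : PySem.List.pyRange (start + 1) (end_ + 1) 1 =
            (start + 1) :: PySem.List.pyRange (start + 1 + 1) (end_ + 1) 1 :=
          PySem.List.pyRange_one_cons (by omega)
        rw [this]
        by_cases h0 : ch = '0' <;> simp [h0, hse]
    -- A's side
    rw [show isVaild s start end_ =
        (if (ch == '0') && (start != end_) then false
         else isVaildLoop s 0 (PySem.List.pyRange start (end_ + 1) 1)) by
      simp only [isVaild, if_neg hgt, hch]]
    rw [loop_bridge s 0 _ _ hmap]
    -- B's side
    rw [show isVaild_alt s start end_ =
        (if ¬ PySem.Chars.strIsdigit ((PySem.List.pyRange start (end_ + 1) 1).map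
            (fun i => (PySem.Str.pyGet? s i).getD ' ')) then false
         else
          match ((PySem.List.pyRange start (end_ + 1) 1).map
            (fun i => (PySem.Str.pyGet? s i).getD ' ')) with
          | [] => false
          | c0 :: _ =>
            if c0 == '0' then
              (((PySem.List.pyRange start (end_ + 1) 1).map
                (fun i => (PySem.Str.pyGet? s i).getD ' ')).length == 1 : Bool)
            else if (((PySem.List.pyRange start (end_ + 1) 1).map
                (fun i => (PySem.Str.pyGet? s i).getD ' ')).length != 3 : Bool) then
              decide (((PySem.List.pyRange start (end_ + 1) 1).map
                (fun i => (PySem.Str.pyGet? s i).getD ' ')).length < 3)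
            else lexLe ((PySem.List.pyRange start (end_ + 1) 1).map
                (fun i => (PySem.Str.pyGet? s i).getD ' ')) ['2', '5', '5']) by
      simp only [isVaild_alt, if_neg hgt, hmap, reduceOption_map_some]
      simp]
    rw [hcs, hguard]
    have := pure_equiv ch ((PySem.List.pyRange (start + 1) (end_ + 1) 1).map
      (fun i => (PySem.Str.pyGet? s i).getD ' '))
    simp only [decide_eq_true_eq]
    exact this
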